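-- pv_equiv track=rewrite | github.com/vkomarov-r7/aoc-2020 | aoc/day14.py | get_addr_perms
-- ===== SOURCE A (Python) =====
-- def get_addr_perms(addr, mask):
--     all_addrs = [[]]
--
--     def add_char(c):
--         for addr in all_addrs:
--             addr.append(c)
--
--     for n in range(len(addr)):
--         a = addr[n]
--         m = mask[n]
--
--         if m == 1:
--             add_char(1)
--         elif m == 0:
--             add_char(a)
--         elif m is None:
--             new_addrs = []
--             for existing_addr in all_addrs:
--                 new_addrs.append(existing_addr + [0])
--                 new_addrs.append(existing_addr + [1])
--             all_addrs = new_addrs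
--
--     return all_addrs
-- ===== SOURCE B (Python) =====
-- import itertools
--
-- def get_addr_perms(addr, mask):
--     template = []
--     floating = []
--     for n in range(len(addr)):
--         a = addr[n]
--         m = mask[n]
--         if m == 1:
--             template.append(1)
--         elif m == 0:
--             template.append(a)
--         elif m is None:
--             floating.append(len(template))
--             template.append(0)
--     result = []
--     for combo in itertools.product((0, 1), repeat=len(floating)):
--         t = template.copy()
--         for i, b in zip(floating, combo):
--             t[i] = b
--         result.append(t)
--     return result
-- ===== Notes on version B (the rewrite author's own statement) =====
-- stated objective: alternative
-- what changed: Instead of growing/mutating the whole address list position by position (doubling it at each floating bit), B builds a template and the list of floating indices in one pass and then materialises each address with itertools.product over the floating bits.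
import Mathlib
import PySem

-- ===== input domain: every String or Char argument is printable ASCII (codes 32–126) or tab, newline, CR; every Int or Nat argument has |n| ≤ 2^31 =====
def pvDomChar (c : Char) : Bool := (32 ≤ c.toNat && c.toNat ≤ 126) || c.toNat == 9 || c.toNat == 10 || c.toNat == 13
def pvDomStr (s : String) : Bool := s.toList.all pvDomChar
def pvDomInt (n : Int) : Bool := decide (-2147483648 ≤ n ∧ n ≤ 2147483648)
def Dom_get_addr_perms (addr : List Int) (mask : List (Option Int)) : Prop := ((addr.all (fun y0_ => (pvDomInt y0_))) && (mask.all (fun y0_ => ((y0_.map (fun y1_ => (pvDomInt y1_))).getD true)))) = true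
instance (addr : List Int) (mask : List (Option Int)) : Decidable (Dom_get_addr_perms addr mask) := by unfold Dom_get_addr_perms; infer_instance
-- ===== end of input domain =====

-- B replaces A's incremental list-doubling by one template-building pass plus an
-- itertools.product over the floating positions (objective: alternative/idiomatic).

-- ===== PORT A =====
-- add_char c: append c to every address in the current list
def pvAddChar (all : List (List Int)) (c : Int) : List (List Int) :=
  all.map (fun l => l ++ [c])

-- one iteration of A's `for n in range(len(addr))` loop body
def pvStepA (addr : List Int) (mask : List (Option Int)) (all : List (List Int)) (n : Nat) : List (List Int) :=
  match PySem.List.pyGet? addr (n : Int), PySem.List.pyGet? mask (n : Int) with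
  | some a, some m =>
    if m = some 1 then pvAddChar all 1
    else if m = some 0 then pvAddChar all a
    else if m = none then all.flatMap (fun l => [l ++ [0], l ++ [1]])
    else all
  | _, _ => all   -- IndexError in Python (mask shorter than addr); excluded by Pre_

def get_addr_perms (addr : List Int) (mask : List (Option Int)) : List (List Int) :=
  (List.range addr.length).foldl (pvStepA addr mask) [[]]

-- ===== PORT B =====
-- itertools.product((0,1), repeat=k), last coordinate varying fastest
def pvProdBits : Nat → List (List Int)
  | 0 => [[]]
  | k + 1 => (pvProdBits k).flatMap (fun c => [c ++ [0], c ++ [1]])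

-- one iteration of B's template/floating building loop
def pvStepB (addr : List Int) (mask : List (Option Int)) (p : List Int × List Nat) (n : Nat) : List Int × List Nat :=
  match PySem.List.pyGet? addr (n : Int), PySem.List.pyGet? mask (n : Int) with
  | some a, some m =>
    if m = some 1 then (p.1 ++ [1], p.2)
    else if m = some 0 then (p.1 ++ [a], p.2)
    else if m = none then (p.1 ++ [0], p.2 ++ [p.1.length])
    else p
  | _, _ => p   -- IndexError in Python; excluded by Pre_

-- write the combination's bits into the floating indices of a template copy
def pvWriteBits (t : List Int) (idxs : List Nat) (c : List Int) : List Int :=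
  (idxs.zip c).foldl (fun t ib => t.set ib.1 ib.2) t

def get_addr_perms_alt (addr : List Int) (mask : List (Option Int)) : List (List Int) :=
  let p := (List.range addr.length).foldl (pvStepB addr mask) ([], [])
  (pvProdBits p.2.length).map (fun c => pvWriteBits p.1 p.2 c)

-- ===== PRECONDITION & SPEC =====
-- A indexes mask[n] for every n < len(addr): a mask shorter than addr raises IndexError.
def Pre_get_addr_perms (addr : List Int) (mask : List (Option Int)) : Prop :=
  addr.length ≤ mask.length
instance (addr : List Int) (mask : List (Option Int)) : Decidable (Pre_get_addr_perms addr mask) := by unfold Pre_get_addr_perms; infer_instance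

def pvWitness_get_addr_perms : List Int × List (Option Int) := ([5, 7, 3], [some 1, none, some 0])

def Spec_get_addr_perms (addr : List Int) (mask : List (Option Int)) (out : List (List Int)) : Prop := out = get_addr_perms_alt addr mask
instance (addr : List Int) (mask : List (Option Int)) (out : List (List Int)) : Decidable (Spec_get_addr_perms addr mask out) := by unfold Spec_get_addr_perms; infer_instance

-- ===== CLAIM (what is proved, stated in full; the proofs are below) =====
def Claim_equal_get_addr_perms : Prop := ∀ (addr : List Int) (mask : List (Option Int)), Dom_get_addr_perms addr mask → Pre_get_addr_perms addr mask → Spec_get_addr_perms addr mask (get_addr_perms addr mask)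

-- ===== LEMMAS AND PROOFS =====

theorem pvProdBits_length {k : Nat} {c : List Int} (h : c ∈ pvProdBits k) : c.length = k := by
  induction k generalizing c with
  | zero => simp [pvProdBits] at h; simp [h]
  | succ k ih =>
    simp only [pvProdBits, List.mem_flatMap] at h
    obtain ⟨d, hd, hc⟩ := h
    have := ih hd
    simp only [List.mem_cons, List.not_mem_nil, or_false] at hc
    rcases hc with h | h <;> subst h <;> simp [this]

theorem flatMap_congr_mem {α β : Type} (l : List α) (f g : α → List β)
    (h : ∀ a ∈ l, f a = g a) : l.flatMap f = l.flatMap g := by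
  induction l with
  | nil => rfl
  | cons a l ih =>
    simp only [List.flatMap_cons]
    rw [h a (by simp), ih (fun a ha => h a (by simp [ha]))]

theorem set_append_singleton_lt (l : List Int) (x : Int) (i : Nat) (b : Int) (h : i < l.length) :
    (l ++ [x]).set i b = l.set i b ++ [x] := by
  rw [List.set_append]; simp [h]

theorem set_append_singleton_self (l : List Int) (x b : Int) :
    (l ++ [x]).set l.length b = l ++ [b] := by
  rw [List.set_append]; simp

theorem writeBits_length (t : List Int) (idxs : List Nat) (c : List Int) :
    (pvWriteBits t idxs c).length = t.length := by
  unfold pvWriteBits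
  induction idxs.zip c generalizing t with
  | nil => rfl
  | cons p l ih => simp [List.foldl_cons, ih]

theorem writeBits_append (t : List Int) (x : Int) (idxs : List Nat) (c : List Int)
    (h : ∀ i ∈ idxs, i < t.length) :
    pvWriteBits (t ++ [x]) idxs c = pvWriteBits t idxs c ++ [x] := by
  induction idxs generalizing c t with
  | nil => simp [pvWriteBits]
  | cons i idxs ih =>
    cases c with
    | nil => simp [pvWriteBits]
    | cons b c =>
      simp only [pvWriteBits, List.zip_cons_cons, List.foldl_cons]
      have hi : i < t.length := h i (by simp)
      rw [set_append_singleton_lt t x i b hi]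
      have := ih (t.set i b) c (by intro j hj; simpa using h j (by simp [hj]))
      simpa [pvWriteBits] using this

theorem writeBits_snoc (t : List Int) (idxs : List Nat) (c : List Int) (b : Int)
    (hlen : idxs.length = c.length) (h : ∀ i ∈ idxs, i < t.length) :
    pvWriteBits (t ++ [0]) (idxs ++ [t.length]) (c ++ [b]) = pvWriteBits t idxs c ++ [b] := by
  unfold pvWriteBits
  rw [List.zip_append hlen, List.foldl_append]
  have h1 : (idxs.zip c).foldl (fun t ib => t.set ib.1 ib.2) (t ++ [0])
      = (idxs.zip c).foldl (fun t ib => t.set ib.1 ib.2) t ++ [0] := by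
    simpa [pvWriteBits] using writeBits_append t 0 idxs c h
  rw [h1]
  simp only [List.zip_cons_cons, List.zip_nil_right, List.foldl_cons, List.foldl_nil]
  have h2 : ((idxs.zip c).foldl (fun t ib => t.set ib.1 ib.2) t).length = t.length := by
    simpa [pvWriteBits] using writeBits_length t idxs c
  rw [← h2, set_append_singleton_self]

-- the loop invariant: A's address list is B's bit-product written into B's template
theorem loop_inv (addr : List Int) (mask : List (Option Int)) (hpre : addr.length ≤ mask.length)
    (m : Nat) (hm : m ≤ addr.length) :
    ((List.range m).foldl (pvStepA addr mask) [[]]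
      = (pvProdBits ((List.range m).foldl (pvStepB addr mask) ([], [])).2.length).map
          (fun c => pvWriteBits ((List.range m).foldl (pvStepB addr mask) ([], [])).1
            ((List.range m).foldl (pvStepB addr mask) ([], [])).2 c))
    ∧ (∀ i ∈ ((List.range m).foldl (pvStepB addr mask) ([], [])).2,
        i < ((List.range m).foldl (pvStepB addr mask) ([], [])).1.length) := by
  induction m with
  | zero => simp [pvProdBits, pvWriteBits]
  | succ m ih =>
    have hm' : m ≤ addr.length := Nat.le_of_succ_le hm
    obtain ⟨ihEq, ihLt⟩ := ih hm'
    have hma : m < addr.length := hm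
    have hmm : m < mask.length := by omega
    have hA : PySem.List.pyGet? addr (m : Int) = some addr[m] := PySem.List.pyGet?_ofNat addr m hma
    have hM : PySem.List.pyGet? mask (m : Int) = some mask[m] := PySem.List.pyGet?_ofNat mask m hmm
    rw [List.range_succ, List.foldl_append, List.foldl_append]
    simp only [List.foldl_cons, List.foldl_nil]
    set p := (List.range m).foldl (pvStepB addr mask) ([], []) with hp
    set all := (List.range m).foldl (pvStepA addr mask) [[]] with hall
    rw [show pvStepA addr mask all m =
        (if mask[m] = some 1 then pvAddChar all 1
         else if mask[m] = some 0 then pvAddChar all addr[m]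
         else if mask[m] = none then all.flatMap (fun l => [l ++ [0], l ++ [1]])
         else all) by simp [pvStepA, hA, hM],
      show pvStepB addr mask p m =
        (if mask[m] = some 1 then (p.1 ++ [1], p.2)
         else if mask[m] = some 0 then (p.1 ++ [addr[m]], p.2)
         else if mask[m] = none then (p.1 ++ [0], p.2 ++ [p.1.length])
         else p) by simp [pvStepB, hA, hM]]
    split_ifs with h1 h0 hn
    · -- mask bit 1
      rw [ihEq]
      refine ⟨?_, ?_⟩
      · simp only [pvAddChar, List.map_map]
        apply List.map_congr_left
        intro c hc
        simp only [Function.comp]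
        exact (writeBits_append p.1 1 p.2 c ihLt).symm
      · intro i hi; have := ihLt i hi; simp; omega
    · -- mask bit 0
      rw [ihEq]
      refine ⟨?_, ?_⟩
      · simp only [pvAddChar, List.map_map]
        apply List.map_congr_left
        intro c hc
        simp only [Function.comp]
        exact (writeBits_append p.1 addr[m] p.2 c ihLt).symm
      · intro i hi; have := ihLt i hi; simp; omega
    · -- floating bit
      rw [ihEq]
      refine ⟨?_, ?_⟩
      · simp only [List.length_append, List.length_cons, List.length_nil, pvProdBits,
          List.map_flatMap, List.flatMap_map]
        apply flatMap_congr_mem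
        intro c hc
        have hlen : p.2.length = c.length := (pvProdBits_length hc).symm
        simp only [List.map_cons, List.map_nil]
        rw [writeBits_snoc p.1 p.2 c 0 hlen ihLt, writeBits_snoc p.1 p.2 c 1 hlen ihLt]
      · intro i hi
        simp only [List.mem_append, List.mem_singleton] at hi
        rcases hi with hi | hi
        · have := ihLt i hi; simp; omega
        · simp [hi]
    · -- other mask value: position skipped by both
      exact ⟨ihEq, ihLt⟩

-- ===== VERDICT (by name: the statement is the Claim_ definition above) =====
theorem get_addr_perms_spec : Claim_equal_get_addr_perms := by
  intro addr mask _ hpre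
  unfold Spec_get_addr_perms get_addr_perms get_addr_perms_alt
  exact (loop_inv addr mask hpre addr.length le_rfl).1
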